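-- pv_equiv track=rewrite | github.com/jakhongirs/algos | binarysearch/main.py | solution
-- ===== SOURCE A (Python) =====
-- import math
--
-- def solution(nums):
--     length = math.floor(len(nums) / 2)
--
--     left = nums[0: length]
--     right = nums[length:]
--
--     all = []
--
--     for left_num in left:
--         for right_num in right:
--             if (left_num < right_num):
--                 all.append(True)
--             else:
--                 all.append(False)
--
--     if (False not in all):
--         return True
--     else:
--         return False
-- ===== SOURCE B (Python) =====
-- def solution(nums):
--     half = len(nums) // 2
--     left = nums[:half]
--     right = nums[half:]
--     if not left or not right:
--         return True
--     max_left = left[0]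
--     for x in left[1:]:
--         if x > max_left:
--             max_left = x
--     min_right = right[0]
--     for x in right[1:]:
--         if x < min_right:
--             min_right = x
--     return max_left < min_right
-- ===== Notes on version B (the rewrite author's own statement) =====
-- stated objective: faster
-- what changed: Replaces the O(n^2) nested loop that appends a boolean per (left,right) pair into a list and then tests 'False not in' with two single passes keeping a running maximum of the left half and minimum of the right half, returning max_left < min_right.
import Mathlib
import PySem

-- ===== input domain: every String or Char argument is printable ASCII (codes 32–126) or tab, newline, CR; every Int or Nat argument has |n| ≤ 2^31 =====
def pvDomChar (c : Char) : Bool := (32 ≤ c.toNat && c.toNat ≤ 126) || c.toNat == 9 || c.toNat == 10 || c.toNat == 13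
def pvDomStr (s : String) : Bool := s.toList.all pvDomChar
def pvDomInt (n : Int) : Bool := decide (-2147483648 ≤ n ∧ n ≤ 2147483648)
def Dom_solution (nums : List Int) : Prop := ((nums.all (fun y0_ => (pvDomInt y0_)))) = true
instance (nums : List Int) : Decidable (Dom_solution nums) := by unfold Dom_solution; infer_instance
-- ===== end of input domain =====

-- B replaces A's O(n^2) pairwise boolean list with one max/min pass per half (faster).
-- ===== PORT A =====
def solution (nums : List Int) : Bool :=
  let length : Int := PySem.Int.floordiv (nums.length : Int) 2
  let left := PySem.List.slice nums (some 0) (some length)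
  let right := PySem.List.slice nums (some length) none
  let all := left.foldl (fun acc left_num =>
    right.foldl (fun acc2 right_num =>
      if left_num < right_num then acc2 ++ [true] else acc2 ++ [false]) acc) []
  if !(all.contains false) then true else false

-- ===== PORT B =====
def solution_alt (nums : List Int) : Bool :=
  let half := nums.length / 2
  let left := nums.take half
  let right := nums.drop half
  match left, right with
  | [], _ => true
  | _, [] => true
  | l0 :: ls, r0 :: rs =>
    let maxLeft := ls.foldl (fun m x => if x > m then x else m) l0
    let minRight := rs.foldl (fun m x => if x < m then x else m) r0
    decide (maxLeft < minRight)

-- ===== PRECONDITION & SPEC =====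
def Spec_solution (nums : List Int) (out : Bool) : Prop := out = solution_alt nums
instance (nums : List Int) (out : Bool) : Decidable (Spec_solution nums out) := by unfold Spec_solution; infer_instance

-- ===== CLAIM (what is proved, stated in full; the proofs are below) =====
def Claim_equal_solution : Prop := ∀ (nums : List Int), Dom_solution nums → Spec_solution nums (solution nums)

-- ===== LEMMAS AND PROOFS =====
lemma init_le_foldlMax (ls : List Int) (a : Int) :
    a ≤ ls.foldl (fun m x => if x > m then x else m) a := by
  induction ls generalizing a with
  | nil => simp
  | cons y ys ih =>
    simp only [List.foldl_cons]
    by_cases hc : y > a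
    · simp only [if_pos hc]; exact le_trans (le_of_lt hc) (ih y)
    · simp only [if_neg hc]; exact ih a

lemma foldlMax_mem (ls : List Int) (a : Int) :
    (ls.foldl (fun m x => if x > m then x else m) a) ∈ a :: ls := by
  induction ls generalizing a with
  | nil => simp
  | cons y ys ih =>
    simp only [List.foldl_cons, List.mem_cons]
    by_cases hc : y > a
    · simp only [if_pos hc]
      have h := ih y
      simp only [List.mem_cons] at h
      rcases h with h | h
      · exact Or.inr (Or.inl h)
      · exact Or.inr (Or.inr h)
    · simp only [if_neg hc]
      have h := ih a
      simp only [List.mem_cons] at h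
      rcases h with h | h
      · exact Or.inl h
      · exact Or.inr (Or.inr h)

lemma le_foldlMax (ls : List Int) (a : Int) :
    ∀ x ∈ a :: ls, x ≤ ls.foldl (fun m x => if x > m then x else m) a := by
  induction ls generalizing a with
  | nil =>
    intro x hx
    simp only [List.mem_cons, List.not_mem_nil, or_false] at hx
    subst hx
    simp
  | cons y ys ih =>
    intro x hx
    simp only [List.mem_cons] at hx
    simp only [List.foldl_cons]
    rcases hx with h | h | h
    · refine le_trans ?_ (init_le_foldlMax ys _)
      subst h
      split_ifs <;> omega
    · refine le_trans ?_ (init_le_foldlMax ys _)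
      subst h
      split_ifs <;> omega
    · exact ih _ x (List.mem_cons_of_mem _ h)

lemma foldlMin_ge_init (ls : List Int) (a : Int) :
    ls.foldl (fun m x => if x < m then x else m) a ≤ a := by
  induction ls generalizing a with
  | nil => simp
  | cons y ys ih =>
    simp only [List.foldl_cons]
    by_cases hc : y < a
    · simp only [if_pos hc]; exact le_trans (ih y) (le_of_lt hc)
    · simp only [if_neg hc]; exact ih a

lemma foldlMin_mem (ls : List Int) (a : Int) :
    (ls.foldl (fun m x => if x < m then x else m) a) ∈ a :: ls := by
  induction ls generalizing a with
  | nil => simp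
  | cons y ys ih =>
    simp only [List.foldl_cons, List.mem_cons]
    by_cases hc : y < a
    · simp only [if_pos hc]
      have h := ih y
      simp only [List.mem_cons] at h
      rcases h with h | h
      · exact Or.inr (Or.inl h)
      · exact Or.inr (Or.inr h)
    · simp only [if_neg hc]
      have h := ih a
      simp only [List.mem_cons] at h
      rcases h with h | h
      · exact Or.inl h
      · exact Or.inr (Or.inr h)

lemma foldlMin_le (ls : List Int) (a : Int) :
    ∀ x ∈ a :: ls, ls.foldl (fun m x => if x < m then x else m) a ≤ x := by
  induction ls generalizing a with
  | nil =>
    intro x hx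
    simp only [List.mem_cons, List.not_mem_nil, or_false] at hx
    subst hx
    simp
  | cons y ys ih =>
    intro x hx
    simp only [List.mem_cons] at hx
    simp only [List.foldl_cons]
    rcases hx with h | h | h
    · refine le_trans (foldlMin_ge_init ys _) ?_
      subst h
      split_ifs <;> omega
    · refine le_trans (foldlMin_ge_init ys _) ?_
      subst h
      split_ifs <;> omega
    · exact ih _ x (List.mem_cons_of_mem _ h)

lemma foldl_inner (l : Int) (right : List Int) (a : List Bool) :
    right.foldl (fun acc2 right_num =>
      if l < right_num then acc2 ++ [true] else acc2 ++ [false]) a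
    = a ++ right.map (fun r => decide (l < r)) := by
  induction right generalizing a with
  | nil => simp
  | cons r rs ih =>
    simp only [List.foldl_cons, List.map_cons]
    rw [ih]
    split_ifs with h <;> simp [h]

lemma foldl_pairs (left right : List Int) (acc : List Bool) :
    left.foldl (fun acc left_num =>
      right.foldl (fun acc2 right_num =>
        if left_num < right_num then acc2 ++ [true] else acc2 ++ [false]) acc) acc
    = acc ++ left.flatMap (fun l => right.map (fun r => decide (l < r))) := by
  induction left generalizing acc with
  | nil => simp
  | cons l ls ih =>
    simp only [List.foldl_cons, List.flatMap_cons]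
    rw [foldl_inner, ih, List.append_assoc]

lemma not_contains_false (l : List Bool) : (!(l.contains false)) = l.all id := by
  apply Bool.eq_iff_iff.mpr
  simp only [Bool.not_eq_true', List.all_eq_true, id_eq,
    List.contains_eq_mem, decide_eq_false_iff_not]
  constructor
  · intro h b hb
    cases b
    · exact absurd hb h
    · rfl
  · intro h hb
    exact absurd (h false hb) (by simp)

lemma solution_eq_all (nums : List Int) :
    solution nums
      = ((nums.take (nums.length / 2)).all (fun l =>
          (nums.drop (nums.length / 2)).all (fun r => decide (l < r)))) := by
  have hfd : PySem.Int.floordiv (nums.length : Int) 2 = ((nums.length / 2 : Nat) : Int) := by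
    exact_mod_cast PySem.Int.floordiv_natCast nums.length 2
  simp only [solution]
  rw [hfd, PySem.List.slice_zero_start, PySem.List.slice_to_natCast,
    PySem.List.slice_from_natCast, foldl_pairs, List.nil_append,
    (by decide : ∀ b : Bool, (if !b then true else false) = !b), not_contains_false]
  apply Bool.eq_iff_iff.mpr
  simp only [List.all_eq_true, List.mem_flatMap, List.mem_map, id_eq, forall_exists_index,
    and_imp]
  constructor
  · intro h l hl r hr
    exact h _ l hl r hr rfl
  · intro h x l hl r hr hx
    rw [← hx]
    exact h l hl r hr

lemma alt_eq_all (nums : List Int) :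
    solution_alt nums
      = ((nums.take (nums.length / 2)).all (fun l =>
          (nums.drop (nums.length / 2)).all (fun r => decide (l < r)))) := by
  simp only [solution_alt]
  rcases hL : nums.take (nums.length / 2) with _ | ⟨l0, ls⟩
  · simp
  · rcases hR : nums.drop (nums.length / 2) with _ | ⟨r0, rs⟩
    · simp
    · apply Bool.eq_iff_iff.mpr
      simp only [decide_eq_true_iff, List.all_eq_true]
      constructor
      · intro hmm l hl r hr
        have h1 := le_foldlMax ls l0 l hl
        have h2 := foldlMin_le rs r0 r hr
        omega
      · intro hall
        exact hall _ (foldlMax_mem ls l0) _ (foldlMin_mem rs r0)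

-- ===== VERDICT (by name: the statement is the Claim_ definition above) =====
theorem solution_spec : Claim_equal_solution := by
  intro nums _
  unfold Spec_solution
  rw [solution_eq_all, alt_eq_all]
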